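-- pv_equiv track=rewrite | github.com/PragalvaXFREZ/meshery-schemas | build/scripts/api-audit.py | _reduce_driven
-- ===== SOURCE A (Python) =====
-- from typing import Any, Dict, List, Optional, Set, Tuple
--
-- def _reduce_driven(values: List[str]) -> str:
--     uniq = {v for v in values if v}
--     if not uniq:
--         return ""
--     if "Partial" in uniq:
--         return "Partial"
--     if "TRUE" in uniq and "FALSE" in uniq:
--         return "Partial"
--     if "TRUE" in uniq:
--         return "TRUE"
--     if "FALSE" in uniq:
--         return "FALSE"
--     return "FALSE"
-- ===== SOURCE B (Python) =====
-- _CLASS = {"Partial": 4, "TRUE": 2, "FALSE": 3}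
-- _OUT = ("", "FALSE", "TRUE", "FALSE", "Partial")
--
--
-- def _join(a, b):
--     # join in the 5-element lattice 0=Bot < 1=Other < {2=TRUE, 3=FALSE} < 4=Partial
--     if a == 0:
--         return b
--     if b == 0:
--         return a
--     if a == 4 or b == 4:
--         return 4
--     if a == 1:
--         return b
--     if b == 1:
--         return a
--     if a == b:
--         return a
--     return 4  # TRUE join FALSE
--
--
-- def _reduce_driven(values):
--     state = 0
--     for v in values:
--         state = _join(state, _CLASS.get(v, 1) if v else 0)
--         if state == 4:
--             break
--     return _OUT[state]
-- ===== Notes on version B (the rewrite author's own statement) =====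
-- stated objective: alternative
-- what changed: Replaced the set comprehension plus post-hoc membership cascade by a fold of a binary join over a 5-element lattice (Bot < Other < {TRUE, FALSE} < Partial) with early exit at the absorbing top and a table lookup for the final answer.
import Mathlib
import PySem

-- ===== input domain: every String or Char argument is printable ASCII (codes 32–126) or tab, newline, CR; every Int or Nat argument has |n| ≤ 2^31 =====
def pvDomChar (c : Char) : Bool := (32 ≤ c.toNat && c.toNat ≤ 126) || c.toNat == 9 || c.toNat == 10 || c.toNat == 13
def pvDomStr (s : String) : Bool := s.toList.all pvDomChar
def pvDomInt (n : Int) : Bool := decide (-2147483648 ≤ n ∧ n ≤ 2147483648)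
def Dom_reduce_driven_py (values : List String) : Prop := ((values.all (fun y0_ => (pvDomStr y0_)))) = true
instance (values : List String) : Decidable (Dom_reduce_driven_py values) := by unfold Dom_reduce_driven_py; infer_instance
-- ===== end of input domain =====

-- B replaces A's set comprehension + membership cascade by a fold of a binary join over a
-- 5-element lattice with early exit at the absorbing top; objective: alternative, same O(n).

-- ===== PORT A =====
-- uniq = {v for v in values if v}; then the priority cascade of membership tests.
def reduce_driven_py (values : List String) : String :=
  let uniq : PySem.Set String := PySem.Set.ofList (values.filter (fun v => v ≠ ""))
  if uniq = [] then ""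
  else if PySem.Set.contains uniq "Partial" then "Partial"
  else if PySem.Set.contains uniq "TRUE" && PySem.Set.contains uniq "FALSE" then "Partial"
  else if PySem.Set.contains uniq "TRUE" then "TRUE"
  else if PySem.Set.contains uniq "FALSE" then "FALSE"
  else "FALSE"

-- ===== PORT B =====
-- Source B's _join: the join of the lattice 0=Bot < 1=Other < {2=TRUE, 3=FALSE} < 4=Partial
def rdJoin (a b : Nat) : Nat :=
  if a = 0 then b
  else if b = 0 then a
  else if a = 4 ∨ b = 4 then 4
  else if a = 1 then b
  else if b = 1 then a
  else if a = b then a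
  else 4

-- Source B's '_CLASS.get(v, 1) if v else 0'
def rdClass (v : String) : Nat :=
  if v = "" then 0
  else if v = "Partial" then 4
  else if v = "TRUE" then 2
  else if v = "FALSE" then 3
  else 1

-- Source B's loop with its 'break' once the absorbing top 4 is reached
def rdLoop (state : Nat) : List String → Nat
  | [] => state
  | v :: vs =>
    let s := rdJoin state (rdClass v)
    if s = 4 then s else rdLoop s vs

-- Source B's final table _OUT[state]
def rdOut (state : Nat) : String :=
  if state = 0 then ""
  else if state = 1 then "FALSE"
  else if state = 2 then "TRUE"
  else if state = 3 then "FALSE"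
  else "Partial"

def reduce_driven_py_alt (values : List String) : String :=
  rdOut (rdLoop 0 values)

-- ===== PRECONDITION & SPEC =====
def Spec_reduce_driven_py (values : List String) (out : String) : Prop := out = reduce_driven_py_alt values
instance (values : List String) (out : String) : Decidable (Spec_reduce_driven_py values out) := by unfold Spec_reduce_driven_py; infer_instance

-- ===== CLAIM (what is proved, stated in full; the proofs are below) =====
def Claim_equal_reduce_driven_py : Prop := ∀ (values : List String), Dom_reduce_driven_py values → Spec_reduce_driven_py values (reduce_driven_py values)

-- ===== LEMMAS AND PROOFS =====

-- the lattice state determined by which kinds of tokens have been seen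
def rdState (p t f o : Bool) : Nat :=
  if p || (t && f) then 4
  else if t then 2
  else if f then 3
  else if o then 1
  else 0

def rdIsOther (v : String) : Bool :=
  v ≠ "" && v ≠ "Partial" && v ≠ "TRUE" && v ≠ "FALSE"

theorem rdJoin_class (p t f o : Bool) (v : String) :
    rdJoin (rdState p t f o) (rdClass v)
      = rdState (p || (v = "Partial")) (t || (v = "TRUE")) (f || (v = "FALSE"))
          (o || rdIsOther v) := by
  by_cases h0 : v = ""
  · subst h0; simp only [rdClass, rdIsOther]; revert p t f o; decide
  · by_cases hp : v = "Partial"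
    · subst hp; simp only [rdClass, rdIsOther]; revert p t f o; decide
    · by_cases ht : v = "TRUE"
      · subst ht; simp only [rdClass, rdIsOther]; revert p t f o; decide
      · by_cases hf : v = "FALSE"
        · subst hf; simp only [rdClass, rdIsOther]; revert p t f o; decide
        · simp only [rdClass, rdIsOther, if_neg h0, if_neg hp, if_neg ht, if_neg hf]
          simp [h0, hp, ht, hf]
          revert p t f o; decide

theorem rdState_top (p t f o x y z w : Bool) (h : (p || (t && f)) = true) :
    rdState (p || x) (t || y) (f || z) (o || w) = 4 := by
  revert p t f o x y z w; decide

theorem rdLoop_state (vs : List String) (p t f o : Bool) :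
    rdLoop (rdState p t f o) vs
      = rdState (p || vs.any (fun v => v = "Partial")) (t || vs.any (fun v => v = "TRUE"))
          (f || vs.any (fun v => v = "FALSE")) (o || vs.any rdIsOther) := by
  induction vs generalizing p t f o with
  | nil => simp [rdLoop]
  | cons v vs ih =>
    simp only [rdLoop, rdJoin_class, List.any_cons]
    by_cases h4 : rdState (p || (v = "Partial")) (t || (v = "TRUE")) (f || (v = "FALSE"))
        (o || rdIsOther v) = 4
    · rw [if_pos h4, h4]
      have htop : (p || decide (v = "Partial")
          || ((t || decide (v = "TRUE")) && (f || decide (v = "FALSE")))) = true := by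
        by_contra hc
        simp only [rdState] at h4
        rw [if_neg (by simpa using hc)] at h4
        revert h4
        split_ifs <;> decide
      have := rdState_top (p || decide (v = "Partial")) (t || decide (v = "TRUE"))
        (f || decide (v = "FALSE")) (o || rdIsOther v)
        (vs.any (fun v => v = "Partial")) (vs.any (fun v => v = "TRUE"))
        (vs.any (fun v => v = "FALSE")) (vs.any rdIsOther) htop
      simp only [← Bool.or_assoc]
      exact this.symm
    · rw [if_neg h4, ih]
      simp [Bool.or_assoc]

-- the final table on a state of seen-bits equals A's decision cascade on the same bits
theorem rdOut_rdState (p t f o : Bool) :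
    rdOut (rdState p t f o)
      = (if (p || t || f || o) = false then ""
         else if p then "Partial"
         else if t && f then "Partial"
         else if t then "TRUE"
         else if f then "FALSE"
         else "FALSE") := by
  revert p t f o; decide

theorem any_ne_empty (vs : List String) :
    vs.any (fun v => v ≠ "")
      = (vs.any (fun v => v = "Partial") || vs.any (fun v => v = "TRUE")
          || vs.any (fun v => v = "FALSE") || vs.any rdIsOther) := by
  induction vs with
  | nil => simp
  | cons v vs ih =>
    simp only [List.any_cons]
    by_cases h0 : v = ""
    · subst h0; simpa [rdIsOther] using ih
    · by_cases hp : v = "Partial"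
      · subst hp; simp
      · by_cases ht : v = "TRUE"
        · subst ht; simp
        · by_cases hf : v = "FALSE"
          · subst hf; simp
          · simp [h0, hp, ht, hf, rdIsOther, Bool.or_comm]

theorem uniq_nil_iff (values : List String) :
    (PySem.Set.ofList (values.filter (fun v => v ≠ "")) = [])
      ↔ values.any (fun v => v ≠ "") = false := by
  rw [List.eq_nil_iff_forall_not_mem, List.any_eq_false]
  constructor
  · intro h v hv hne
    exact h v (by
      rw [PySem.Set.mem_ofList, List.mem_filter]
      exact ⟨hv, hne⟩)
  · intro h x hx
    rw [PySem.Set.mem_ofList, List.mem_filter] at hx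
    exact h x hx.1 (by simpa using hx.2)

theorem contains_uniq (values : List String) (s : String) (hs : s ≠ "") :
    PySem.Set.contains (PySem.Set.ofList (values.filter (fun v => v ≠ ""))) s
      = values.any (fun v => v = s) := by
  rw [Bool.eq_iff_iff, PySem.Set.contains_iff, PySem.Set.mem_ofList, List.mem_filter,
    List.any_eq_true]
  constructor
  · intro ⟨h, _⟩; exact ⟨s, h, by simp⟩
  · rintro ⟨v, hv, hvs⟩
    simp only [decide_eq_true_eq] at hvs
    subst hvs
    exact ⟨hv, by simpa using hs⟩

theorem a_eq_core (values : List String) :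
    reduce_driven_py values
      = (if values.any (fun v => v ≠ "") = false then ""
         else if values.any (fun v => v = "Partial") then "Partial"
         else if values.any (fun v => v = "TRUE") && values.any (fun v => v = "FALSE") then "Partial"
         else if values.any (fun v => v = "TRUE") then "TRUE"
         else if values.any (fun v => v = "FALSE") then "FALSE"
         else "FALSE") := by
  unfold reduce_driven_py
  by_cases hu : PySem.Set.ofList (values.filter (fun v => v ≠ "")) = []
  · rw [if_pos hu, if_pos ((uniq_nil_iff values).mp hu)]
  · have ha : values.any (fun v => v ≠ "") = true := by
      cases h : values.any (fun v => v ≠ "") with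
      | false => exact absurd ((uniq_nil_iff values).mpr h) hu
      | true => rfl
    simp only [hu, if_false, ha,
      contains_uniq values "Partial" (by decide),
      contains_uniq values "TRUE" (by decide),
      contains_uniq values "FALSE" (by decide)]
    simp

theorem alt_eq_core (values : List String) :
    reduce_driven_py_alt values
      = (if values.any (fun v => v ≠ "") = false then ""
         else if values.any (fun v => v = "Partial") then "Partial"
         else if values.any (fun v => v = "TRUE") && values.any (fun v => v = "FALSE") then "Partial"
         else if values.any (fun v => v = "TRUE") then "TRUE"
         else if values.any (fun v => v = "FALSE") then "FALSE"
         else "FALSE") := by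
  have h0 : (0 : Nat) = rdState false false false false := by decide
  rw [reduce_driven_py_alt, h0, rdLoop_state]
  simp only [Bool.false_or]
  rw [rdOut_rdState, any_ne_empty]

-- ===== VERDICT (by name: the statement is the Claim_ definition above) =====
theorem reduce_driven_py_spec : Claim_equal_reduce_driven_py := by
  intro values _
  show reduce_driven_py values = reduce_driven_py_alt values
  rw [a_eq_core, alt_eq_core]
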